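-- pv_equiv track=rewrite | github.com/cjmaloof/ggo | py/ggo.py | playerCombinationsForNTablesRecursive
-- ===== SOURCE A (Python) =====
-- def playerCombinationsForNTablesRecursive(playerCount, tableCount, maxGroupSize, maxGroupsOfMaxSize):
--     if playerCount == 0:
--         return [[() for i in range(tableCount)]]
--
--     result = []
--     smaller = playerCombinationsForNTablesRecursive(playerCount-1, tableCount, maxGroupSize, maxGroupsOfMaxSize)
--     for combination in smaller:
--         result.extend(waysToAddPlayer(combination, playerCount-1, maxGroupSize, maxGroupsOfMaxSize))
--     return result
--
-- def waysToAddPlayer(combination, newPlayer, maxGroupSize, maxGroupsOfMaxSize):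
--     result = []
--     groupsOfMaxSize = len([g for g in combination if len(g) == maxGroupSize])
--     for (i, group) in enumerate(combination):
--         # Don't add to a group at max size, and don't create a new one if we have enough
--         if len(group) < maxGroupSize and (groupsOfMaxSize < maxGroupsOfMaxSize or len(group) < maxGroupSize-1):
--             subresult = list(combination)
--             subresult[i] = subresult[i] + (newPlayer,)
--             result.append(subresult)
--             # Ensure that groups within a combination are ordered by leftmost element
--             if len(group) == 0:
--                 break
--     return result
-- ===== SOURCE B (Python) =====
-- def playerCombinationsForNTablesRecursive(playerCount, tableCount, maxGroupSize, maxGroupsOfMaxSize):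
--     current = [[() for _ in range(tableCount)]]
--     for newPlayer in range(playerCount):
--         current = [way
--                    for comb in current
--                    for way in _ways(comb, newPlayer,
--                                     sum(1 for g in comb if len(g) == maxGroupSize),
--                                     maxGroupSize, maxGroupsOfMaxSize)]
--     return current
--
--
-- def _ways(comb, newPlayer, full, maxGroupSize, maxGroupsOfMaxSize):
--     out = []
--     prefix = []
--     for i, g in enumerate(comb):
--         if len(g) < maxGroupSize and (full < maxGroupsOfMaxSize or len(g) < maxGroupSize - 1):
--             out.append(prefix + [g + (newPlayer,)] + comb[i+1:])
--             if len(g) == 0: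
--                 return out
--         prefix.append(g)
--     return out
-- ===== Notes on version B (the rewrite author's own statement) =====
-- stated objective: alternative
-- what changed: A's linear recursion on playerCount is replaced by an iterative for-loop over range(playerCount) with a flat list comprehension, and A's helper that copies the whole combination and mutates one slot is replaced by a one-pass prefix-accumulator scan that assembles each new combination as prefix + [group+(newPlayer,)] + suffix.
import Mathlib
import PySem

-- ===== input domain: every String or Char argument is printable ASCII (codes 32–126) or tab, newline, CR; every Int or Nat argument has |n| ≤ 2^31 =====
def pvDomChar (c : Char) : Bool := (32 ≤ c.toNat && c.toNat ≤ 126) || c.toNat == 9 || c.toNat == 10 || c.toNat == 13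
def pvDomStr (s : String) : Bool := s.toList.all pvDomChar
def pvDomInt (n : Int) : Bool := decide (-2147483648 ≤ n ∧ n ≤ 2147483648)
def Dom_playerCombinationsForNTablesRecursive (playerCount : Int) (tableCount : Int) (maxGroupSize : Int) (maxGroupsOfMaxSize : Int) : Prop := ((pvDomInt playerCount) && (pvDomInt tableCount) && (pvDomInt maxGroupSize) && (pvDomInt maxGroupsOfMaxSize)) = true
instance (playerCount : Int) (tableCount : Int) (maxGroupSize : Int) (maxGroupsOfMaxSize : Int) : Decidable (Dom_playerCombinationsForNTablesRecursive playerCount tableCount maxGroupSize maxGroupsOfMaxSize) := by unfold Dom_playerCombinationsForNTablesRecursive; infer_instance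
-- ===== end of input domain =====

-- B replaces A's recursion on playerCount by an iterative range loop with a flat comprehension,
-- and A's index-loop-with-copy-and-set helper by a one-pass prefix-accumulator helper building each way
-- as prefix ++ [group ++ [newPlayer]] ++ suffix (objective: alternative decomposition, same asymptotic cost).

-- ===== PORT A =====
-- the enumerate-loop of waysToAddPlayer, with its mid-loop break; i is the enumerate index
def pvWaysLoop (comb : List (List Int)) (newPlayer maxGroupSize maxGroupsOfMaxSize full : Int) :
    Nat → List (List Int) → List (List (List Int)) → List (List (List Int))
  | _, [], acc => acc
  | i, g :: rs, acc =>
    if (g.length : Int) < maxGroupSize ∧ (full < maxGroupsOfMaxSize ∨ (g.length : Int) < maxGroupSize - 1) then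
      if g.length = 0 then acc ++ [comb.set i (g ++ [newPlayer])]
      else pvWaysLoop comb newPlayer maxGroupSize maxGroupsOfMaxSize full (i+1) rs (acc ++ [comb.set i (g ++ [newPlayer])])
    else pvWaysLoop comb newPlayer maxGroupSize maxGroupsOfMaxSize full (i+1) rs acc

def pvWaysToAddPlayer (comb : List (List Int)) (newPlayer maxGroupSize maxGroupsOfMaxSize : Int) : List (List (List Int)) :=
  pvWaysLoop comb newPlayer maxGroupSize maxGroupsOfMaxSize
    (((comb.filter (fun g => (g.length : Int) == maxGroupSize)).length : Int)) 0 comb []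

-- A's recursion on playerCount; for playerCount < 0 Python A recurses forever (RecursionError),
-- excluded by Pre_, so the port recurses on playerCount.toNat
def pvRecA : Nat → Int → Int → Int → List (List (List Int))
  | 0, tableCount, _, _ => [(PySem.List.pyRange 0 tableCount 1).map (fun _ => ([] : List Int))]
  | n+1, tableCount, maxGroupSize, maxGroupsOfMaxSize =>
      (pvRecA n tableCount maxGroupSize maxGroupsOfMaxSize).foldl
        (fun result combination => result ++ pvWaysToAddPlayer combination (n : Int) maxGroupSize maxGroupsOfMaxSize) []

def playerCombinationsForNTablesRecursive (playerCount : Int) (tableCount : Int) (maxGroupSize : Int) (maxGroupsOfMaxSize : Int) : List (List (List Int)) :=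
  pvRecA playerCount.toNat tableCount maxGroupSize maxGroupsOfMaxSize

-- ===== PORT B =====
-- B's helper: one pass over comb with a growing prefix accumulator; each way is prefix ++ [g ++ [newPlayer]] ++ (suffix after the cursor)
def pvWays (pre rest : List (List Int)) (newPlayer full maxGroupSize maxGroupsOfMaxSize : Int) (out : List (List (List Int))) : List (List (List Int)) :=
  match rest with
  | [] => out
  | g :: rs =>
    if (g.length : Int) < maxGroupSize ∧ (full < maxGroupsOfMaxSize ∨ (g.length : Int) < maxGroupSize - 1) then
      if g.length = 0 then out ++ [pre ++ [g ++ [newPlayer]] ++ rs]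
      else pvWays (pre ++ [g]) rs newPlayer full maxGroupSize maxGroupsOfMaxSize (out ++ [pre ++ [g ++ [newPlayer]] ++ rs])
    else pvWays (pre ++ [g]) rs newPlayer full maxGroupSize maxGroupsOfMaxSize out

def playerCombinationsForNTablesRecursive_alt (playerCount : Int) (tableCount : Int) (maxGroupSize : Int) (maxGroupsOfMaxSize : Int) : List (List (List Int)) :=
  (PySem.List.pyRange 0 playerCount 1).foldl
    (fun current newPlayer =>
      current.flatMap (fun comb =>
        pvWays [] comb newPlayer ((comb.countP (fun g => (g.length : Int) == maxGroupSize) : Int)) maxGroupSize maxGroupsOfMaxSize []))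
    [(PySem.List.pyRange 0 tableCount 1).map (fun _ => ([] : List Int))]

-- ===== PRECONDITION & SPEC =====
-- Pre_ excludes playerCount < 0, on which Python A recurses without a base case and raises RecursionError
def Pre_playerCombinationsForNTablesRecursive (playerCount : Int) (tableCount : Int) (maxGroupSize : Int) (maxGroupsOfMaxSize : Int) : Prop :=
  0 ≤ playerCount
instance (playerCount : Int) (tableCount : Int) (maxGroupSize : Int) (maxGroupsOfMaxSize : Int) : Decidable (Pre_playerCombinationsForNTablesRecursive playerCount tableCount maxGroupSize maxGroupsOfMaxSize) := by unfold Pre_playerCombinationsForNTablesRecursive; infer_instance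

def pvWitness_playerCombinationsForNTablesRecursive : Int × Int × Int × Int := (3, 2, 2, 2)

def Spec_playerCombinationsForNTablesRecursive (playerCount : Int) (tableCount : Int) (maxGroupSize : Int) (maxGroupsOfMaxSize : Int) (out : List (List (List Int))) : Prop := out = playerCombinationsForNTablesRecursive_alt playerCount tableCount maxGroupSize maxGroupsOfMaxSize
instance (playerCount : Int) (tableCount : Int) (maxGroupSize : Int) (maxGroupsOfMaxSize : Int) (out : List (List (List Int))) : Decidable (Spec_playerCombinationsForNTablesRecursive playerCount tableCount maxGroupSize maxGroupsOfMaxSize out) := by unfold Spec_playerCombinationsForNTablesRecursive; infer_instance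

-- ===== CLAIM (what is proved, stated in full; the proofs are below) =====
def Claim_equal_playerCombinationsForNTablesRecursive : Prop := ∀ (playerCount : Int) (tableCount : Int) (maxGroupSize : Int) (maxGroupsOfMaxSize : Int), Dom_playerCombinationsForNTablesRecursive playerCount tableCount maxGroupSize maxGroupsOfMaxSize → Pre_playerCombinationsForNTablesRecursive playerCount tableCount maxGroupSize maxGroupsOfMaxSize → Spec_playerCombinationsForNTablesRecursive playerCount tableCount maxGroupSize maxGroupsOfMaxSize (playerCombinationsForNTablesRecursive playerCount tableCount maxGroupSize maxGroupsOfMaxSize)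


-- ===== LEMMAS AND PROOFS =====

-- setting the element just after a prefix
theorem pv_set_append (pre : List (List Int)) (g : List Int) (rs : List (List Int)) (x : List Int) :
    (pre ++ g :: rs).set pre.length x = pre ++ x :: rs := by
  induction pre with
  | nil => simp
  | cons h t ih => simp [ih]

-- A's enumerate loop (index + copy-and-set) equals B's prefix-accumulator pass
theorem pvWaysLoop_eq_pvWays (newPlayer maxGroupSize maxGroupsOfMaxSize full : Int) :
    ∀ (rest pre : List (List Int)) (acc : List (List (List Int))),
      pvWaysLoop (pre ++ rest) newPlayer maxGroupSize maxGroupsOfMaxSize full pre.length rest acc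
        = pvWays pre rest newPlayer full maxGroupSize maxGroupsOfMaxSize acc := by
  intro rest
  induction rest with
  | nil => intro pre acc; simp [pvWaysLoop, pvWays]
  | cons g rs ih =>
    intro pre acc
    rw [pvWaysLoop, pvWays]
    split_ifs with h1 h2
    · rw [pv_set_append]; simp
    · rw [pv_set_append]
      have := ih (pre ++ [g]) (acc ++ [pre ++ (g ++ [newPlayer]) :: rs])
      simp only [List.append_assoc, List.length_append, List.length_cons, List.length_nil] at this ⊢
      simpa using this
    · have := ih (pre ++ [g]) acc
      simp only [List.append_assoc, List.length_append, List.length_cons, List.length_nil] at this ⊢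
      simpa using this

theorem pvWaysToAddPlayer_eq (comb : List (List Int)) (newPlayer maxGroupSize maxGroupsOfMaxSize : Int) :
    pvWaysToAddPlayer comb newPlayer maxGroupSize maxGroupsOfMaxSize
      = pvWays [] comb newPlayer ((comb.countP (fun g => (g.length : Int) == maxGroupSize) : Int)) maxGroupSize maxGroupsOfMaxSize [] := by
  have h := pvWaysLoop_eq_pvWays newPlayer maxGroupSize maxGroupsOfMaxSize
      (((comb.filter (fun g => (g.length : Int) == maxGroupSize)).length : Int)) comb [] []
  simp only [List.nil_append, List.length_nil] at h
  rw [pvWaysToAddPlayer, h, List.countP_eq_length_filter]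

-- A's recursion equals B's fold over range(0, n)
theorem pvRecA_eq_fold (n : Nat) (tableCount maxGroupSize maxGroupsOfMaxSize : Int) :
    pvRecA n tableCount maxGroupSize maxGroupsOfMaxSize
      = playerCombinationsForNTablesRecursive_alt (n : Int) tableCount maxGroupSize maxGroupsOfMaxSize := by
  induction n with
  | zero =>
    simp [pvRecA, playerCombinationsForNTablesRecursive_alt, PySem.List.pyRange_zero]
  | succ n ih =>
    rw [pvRecA, ih]
    unfold playerCombinationsForNTablesRecursive_alt
    have hsplit : PySem.List.pyRange 0 ((n : Int) + 1) 1
        = PySem.List.pyRange 0 (n : Int) 1 ++ [(n : Int)] :=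
      PySem.List.pyRange_one_succ_right (by exact_mod_cast Int.natCast_nonneg n)
    push_cast
    rw [hsplit, List.foldl_append]
    simp only [List.foldl_cons, List.foldl_nil]
    rw [PySem.List.foldl_append_eq_flatMap]
    simp only [List.nil_append]
    congr 1
    funext comb
    exact pvWaysToAddPlayer_eq comb (n : Int) maxGroupSize maxGroupsOfMaxSize

-- ===== VERDICT (by name: the statement is the Claim_ definition above) =====
theorem playerCombinationsForNTablesRecursive_spec : Claim_equal_playerCombinationsForNTablesRecursive := by
  intro p t m k _ hpre
  unfold Spec_playerCombinationsForNTablesRecursive playerCombinationsForNTablesRecursive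
  have := pvRecA_eq_fold p.toNat t m k
  rwa [Int.toNat_of_nonneg hpre] at this
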